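-- pv_equiv track=rewrite | github.com/MuXaKeR9239/Labs | Lab№8/1.1.py | f
-- ===== SOURCE A (Python) =====
-- def f(y,j):
--
--     mas=[]
--
--     for i in range(len(y)):
--
--         mas.append(y[i] - y[i-1])
--
--     mas.pop(0)
--
--     if j == 1:
--
--         return mas
--
--     else:
--
--         j-=1
--
--         return f(mas, j)
-- ===== SOURCE B (Python) =====
-- # Closed form: the j-th repeated difference via binomial coefficients
-- # (Pascal row built once), instead of A's recursive re-differencing.
-- def f(y, j):
--     if j < 1 or j > len(y):
--         raise ValueError("need 1 <= j <= len(y)")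
--     c = [1]
--     for _ in range(j):
--         c = [1] + [c[i] + c[i + 1] for i in range(len(c) - 1)] + [1]
--     return [sum((-1) ** (j - i) * c[i] * y[k + i] for i in range(j + 1))
--             for k in range(len(y) - j)]
-- ===== Notes on version B (the rewrite author's own statement) =====
-- stated objective: alternative
-- what changed: Replaces A's recursive pass-by-pass re-differencing with a closed form: validate 1 <= j <= len(y) (ValueError otherwise, where A raises IndexError), build Pascal's row for j once and compute each output entry directly as sum_i (-1)^(j-i)*C(j,i)*y[k+i].
import Mathlib
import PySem

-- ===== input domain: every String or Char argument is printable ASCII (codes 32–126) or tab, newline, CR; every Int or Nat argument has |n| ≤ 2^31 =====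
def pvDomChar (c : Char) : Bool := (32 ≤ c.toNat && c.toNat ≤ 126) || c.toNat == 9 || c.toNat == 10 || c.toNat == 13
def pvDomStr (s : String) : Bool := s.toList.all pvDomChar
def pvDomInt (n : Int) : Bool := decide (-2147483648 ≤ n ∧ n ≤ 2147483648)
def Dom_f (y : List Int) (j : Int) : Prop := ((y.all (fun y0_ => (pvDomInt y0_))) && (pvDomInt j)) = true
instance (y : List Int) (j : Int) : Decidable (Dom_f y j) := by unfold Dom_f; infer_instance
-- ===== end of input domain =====

-- B replaces A's recursive pass-by-pass differencing by the signed-binomial closed form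
-- (Pascal row built once); alternative algorithm, return value proved equal on Pre_f.


-- ===== PORT A =====
-- 'mas' after A's loop is [y[i] - y[i-1] for i in range(len(y))]; Python's y[-1] at i = 0
-- wraps to the last element, which pyGetD computes exactly (every index is in range for
-- nonempty y). 'mas.pop(0)' leaves the tail. On an empty 'mas' Python's pop(0) raises
-- IndexError — those inputs are excluded by Pre_f; the port returns [] there.
def f (y : List Int) (j : Int) : List Int :=
  if _h : (PySem.List.pyRange 0 (y.length : Int) 1).map
      (fun i => PySem.List.pyGetD y i 0 - PySem.List.pyGetD y (i - 1) 0) = [] then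
    []
  else
    let mas := ((PySem.List.pyRange 0 (y.length : Int) 1).map
      (fun i => PySem.List.pyGetD y i 0 - PySem.List.pyGetD y (i - 1) 0)).tail
    if j == 1 then mas else f mas (j - 1)
termination_by y.length
decreasing_by
  simp only [List.length_tail, List.length_map, PySem.List.length_pyRange_one]
  have hy : y ≠ [] := by
    intro hy; subst hy; simp [PySem.List.pyRange] at _h
  have : 0 < y.length := List.length_pos_iff.mpr hy
  omega

-- ===== PORT B =====
-- Transliteration of Source B: validate 1 <= j <= len(y) (elsewhere Source B raises ValueError),
-- then a fold building Pascal's row c for j, then the comprehension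
-- of signed binomial sums; (-1)**(j-i) has the exponent j-i ≥ 0 whenever the inner range
-- is nonempty, so Int pow on the toNat of j-i is exact there.
def f_alt (y : List Int) (j : Int) : List Int :=
  if j < 1 ∨ (y.length : Int) < j then [] -- Python B raises ValueError here (outside Pre_f)
  else
  let c := (PySem.List.pyRange 0 j 1).foldl
    (fun c _ => [1] ++ ((PySem.List.pyRange 0 ((c.length : Int) - 1) 1).map
        (fun i => PySem.List.pyGetD c i 0 + PySem.List.pyGetD c (i + 1) 0)) ++ [1])
    [(1 : Int)]
  (PySem.List.pyRange 0 ((y.length : Int) - j) 1).map (fun k =>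
    ((PySem.List.pyRange 0 (j + 1) 1).map
      (fun i => (-1 : Int) ^ (j - i).toNat * PySem.List.pyGetD c i 0
                  * PySem.List.pyGetD y (k + i) 0)).sum)

-- ===== PRECONDITION & SPEC =====
-- Pre_f: exactly the inputs on which Python A returns; for j < 1 or j > len(y) A's
-- pop(0) eventually hits an empty list and raises IndexError.
def Pre_f (y : List Int) (j : Int) : Prop := 1 ≤ j ∧ j ≤ (y.length : Int)
instance (y : List Int) (j : Int) : Decidable (Pre_f y j) := by unfold Pre_f; infer_instance
def pvWitness_f : List Int × Int := ([3, 1, 4, 1, 5], 2)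

def Spec_f (y : List Int) (j : Int) (out : List Int) : Prop := out = f_alt y j
instance (y : List Int) (j : Int) (out : List Int) : Decidable (Spec_f y j out) := by unfold Spec_f; infer_instance

-- ===== CLAIM (what is proved, stated in full; the proofs are below) =====
def Claim_equal_f : Prop := ∀ (y : List Int) (j : Int), Dom_f y j → Pre_f y j → Spec_f y j (f y j)

-- ===== LEMMAS AND PROOFS =====

-- one differencing pass: what A computes per call
def ddL (y : List Int) : List Int :=
  (List.range (y.length - 1)).map (fun k => y.getD (k + 1) 0 - y.getD k 0)

-- the signed binomial sum of B's closed form, entry k at depth m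
def S (m : ℕ) (y : List Int) (k : ℕ) : Int :=
  ∑ i ∈ Finset.range (m + 1), (-1 : Int) ^ (m - i) * (m.choose i) * y.getD (k + i) 0

def cf (m : ℕ) (y : List Int) : List Int :=
  (List.range (y.length - m)).map (fun k => S m y k)

def rowP (m : ℕ) : List Int := (List.range (m + 1)).map (fun i => ((m.choose i : ℕ) : Int))

theorem getD_map_range' (n k : ℕ) (g : ℕ → ℤ) (h : k < n) :
    (((List.range n).map g).getD k 0) = g k := by
  rw [List.getD_eq_getElem?_getD]
  simp [h]

theorem getD_ddL (y : List Int) (t : ℕ) (ht : t < y.length - 1) :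
    (ddL y).getD t 0 = y.getD (t + 1) 0 - y.getD t 0 := by
  unfold ddL; exact getD_map_range' _ _ _ ht

theorem length_ddL (y : List Int) : (ddL y).length = y.length - 1 := by
  simp [ddL]

-- differencing once under the closed form raises the depth by one (Pascal's identity)
theorem S_ddL (y : List Int) (m k : ℕ) (hk : k + m < y.length - 1) :
    S m (ddL y) k = S (m + 1) y k := by
  unfold S
  have h1 : ∑ i ∈ Finset.range (m+1), (-1:Int)^(m-i) * (m.choose i) * (ddL y).getD (k+i) 0
      = ∑ i ∈ Finset.range (m+1), (-1:Int)^(m-i) * (m.choose i) * (y.getD (k+i+1) 0 - y.getD (k+i) 0) :=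
    Finset.sum_congr rfl (fun i hi => by
      rw [getD_ddL y (k + i) (by simp only [Finset.mem_range] at hi; omega)])
  rw [h1]
  simp only [mul_sub]
  rw [Finset.sum_sub_distrib]
  conv_rhs => rw [Finset.sum_range_succ']
  have hg : ∀ i ∈ Finset.range (m+1),
      (-1:Int)^(m+1-(i+1)) * ((m+1).choose (i+1)) * y.getD (k+(i+1)) 0
      = (-1:Int)^(m-i) * (m.choose i) * y.getD (k+i+1) 0
        + (-1:Int)^(m-i) * (m.choose (i+1)) * y.getD (k+i+1) 0 := by
    intro i hi
    rw [show m+1-(i+1) = m-i by omega, Nat.choose_succ_succ, show k+(i+1) = k+i+1 by omega]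
    push_cast
    ring
  rw [Finset.sum_congr rfl hg, Finset.sum_add_distrib]
  have hC : ∑ i ∈ Finset.range (m+1), (-1:Int)^(m-i) * (m.choose (i+1)) * y.getD (k+i+1) 0
      = ∑ i ∈ Finset.range m, (-1:Int)^(m-i) * (m.choose (i+1)) * y.getD (k+i+1) 0 := by
    rw [Finset.sum_range_succ]
    simp [Nat.choose_succ_self]
  have hB : ∑ i ∈ Finset.range (m+1), (-1:Int)^(m-i) * (m.choose i) * y.getD (k+i) 0
      = ∑ i ∈ Finset.range m, (-1:Int)^(m-(i+1)) * (m.choose (i+1)) * y.getD (k+(i+1)) 0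
        + (-1:Int)^m * (m.choose 0) * y.getD (k+0) 0 := Finset.sum_range_succ' _ _
  rw [hC, hB]
  have hterm : ∀ i ∈ Finset.range m,
      (-1:Int)^(m-i) * (m.choose (i+1)) * y.getD (k+i+1) 0
      = -((-1:Int)^(m-(i+1)) * (m.choose (i+1)) * y.getD (k+(i+1)) 0) := by
    intro i hi
    simp only [Finset.mem_range] at hi
    rw [show m-i = (m-(i+1))+1 by omega, pow_succ, show k+(i+1) = k+i+1 by omega]
    ring
  rw [Finset.sum_congr rfl hterm, Finset.sum_neg_distrib]
  simp [pow_succ]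
  ring

theorem cf_ddL (y : List Int) (m : ℕ) : cf m (ddL y) = cf (m + 1) y := by
  unfold cf
  rw [length_ddL, show y.length - 1 - m = y.length - (m+1) by omega]
  apply List.map_congr_left
  intro k hk
  simp only [List.mem_range] at hk
  exact S_ddL y m k (by omega)

theorem sum_list_range (n : ℕ) (f : ℕ → ℤ) :
    ((List.range n).map f).sum = ∑ i ∈ Finset.range n, f i := rfl

-- one step of B's Pascal fold sends row m to row m+1
theorem pascal_step (m : ℕ) :
    [(1:Int)] ++ ((PySem.List.pyRange 0 (((rowP m).length : Int) - 1) 1).map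
        (fun i => PySem.List.pyGetD (rowP m) i 0 + PySem.List.pyGetD (rowP m) (i + 1) 0)) ++ [1]
      = rowP (m + 1) := by
  have hlen : ((rowP m).length : Int) - 1 = (m : Int) := by simp [rowP]
  rw [hlen, PySem.List.pyRange_one, List.map_map]
  rw [show ((m : Int) - 0).toNat = m by omega]
  have hmid : ∀ k ∈ List.range m,
      ((fun i => PySem.List.pyGetD (rowP m) i 0 + PySem.List.pyGetD (rowP m) (i + 1) 0) ∘
        (fun k : ℕ => (0 : Int) + k)) k = (((m+1).choose (k+1) : ℕ) : Int) := by
    intro k hk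
    simp only [List.mem_range] at hk
    simp only [Function.comp, zero_add]
    rw [show (k : Int) + 1 = ((k + 1 : ℕ) : Int) by push_cast; ring,
        PySem.List.pyGetD_natCast, PySem.List.pyGetD_natCast]
    unfold rowP
    rw [getD_map_range' _ _ _ (by omega), getD_map_range' _ _ _ (by omega),
        Nat.choose_succ_succ]
    push_cast; ring
  rw [List.map_congr_left hmid]
  unfold rowP
  rw [show m + 1 + 1 = (m + 1) + 1 by rfl, List.range_succ_eq_map, List.map_cons]
  simp only [List.map_map]
  rw [List.range_succ, List.map_append]
  simp [Nat.choose_self, Function.comp, Nat.succ_eq_add_one]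

-- B's fold builds Pascal's row m
theorem pascal_fold (m : ℕ) :
    (PySem.List.pyRange 0 (m : Int) 1).foldl
      (fun c _ => [(1:Int)] ++ ((PySem.List.pyRange 0 ((c.length : Int) - 1) 1).map
          (fun i => PySem.List.pyGetD c i 0 + PySem.List.pyGetD c (i + 1) 0)) ++ [1])
      [(1 : Int)] = rowP m := by
  induction m with
  | zero =>
      rw [PySem.List.pyRange_one_eq_nil (by norm_num)]
      simp [rowP]
  | succ n ih =>
      rw [show ((n + 1 : ℕ) : Int) = (n : Int) + 1 by push_cast; ring,
          PySem.List.pyRange_one_succ_right (by positivity), List.foldl_append]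
      simp only [List.foldl_cons, List.foldl_nil]
      rw [ih, pascal_step]

theorem f_alt_eq_cf (y : List Int) (m : ℕ) (h1 : 1 ≤ m) (hm : m ≤ y.length) :
    f_alt y (m : Int) = cf m y := by
  unfold f_alt
  rw [if_neg (by push_cast; omega)]
  simp only [pascal_fold]
  rw [PySem.List.pyRange_one 0 ((y.length : Int) - (m : Int)), List.map_map]
  rw [show (((y.length : Int) - m) - 0).toNat = y.length - m by omega]
  unfold cf
  apply List.map_congr_left
  intro k hk
  simp only [List.mem_range] at hk
  simp only [Function.comp, zero_add]
  rw [PySem.List.pyRange_one 0 ((m : Int) + 1), List.map_map,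
      show (((m : Int) + 1) - 0).toNat = m + 1 by omega]
  have hterm : ∀ i ∈ List.range (m + 1),
      ((fun i => (-1 : Int) ^ ((m : Int) - i).toNat * PySem.List.pyGetD (rowP m) i 0
          * PySem.List.pyGetD y ((k : Int) + i) 0) ∘ (fun a : ℕ => (0 : Int) + a)) i
      = (-1 : Int) ^ (m - i) * (m.choose i) * y.getD (k + i) 0 := by
    intro i hi
    simp only [List.mem_range] at hi
    simp only [Function.comp, zero_add]
    rw [show ((m : Int) - (i : ℕ)).toNat = m - i by omega,
        PySem.List.pyGetD_natCast,
        show (k : Int) + (i : ℕ) = ((k + i : ℕ) : Int) by push_cast; ring,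
        PySem.List.pyGetD_natCast]
    unfold rowP
    rw [getD_map_range' _ _ _ (by omega)]
  rw [List.map_congr_left hterm, sum_list_range]
  rfl

theorem tail_map_eq_ddL (y : List Int) (hy : y ≠ []) :
    ((PySem.List.pyRange 0 (y.length : Int) 1).map
      (fun i => PySem.List.pyGetD y i 0 - PySem.List.pyGetD y (i - 1) 0)).tail = ddL y := by
  have hn : (0:Int) < y.length := by
    have := List.length_pos_iff.mpr hy; exact_mod_cast this
  rw [PySem.List.pyRange_one_cons hn]
  simp only [List.map_cons, List.tail_cons]
  rw [PySem.List.pyRange_one, List.map_map, ddL]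
  rw [show ((y.length : Int) - (0 + 1)).toNat = y.length - 1 by omega]
  apply List.map_congr_left
  intro k hk
  simp only [Function.comp, zero_add]
  rw [show (1 : Int) + (k : Int) - 1 = ((k : ℕ) : Int) by omega,
      show (1 : Int) + (k : Int) = ((k + 1 : ℕ) : Int) by push_cast; ring,
      PySem.List.pyGetD_natCast, PySem.List.pyGetD_natCast]

-- A's recursion, one unfolding: for nonempty y one pass is ddL y
theorem f_unfold (y : List Int) (hy : y ≠ []) (j : Int) :
    f y j = if j = 1 then ddL y else f (ddL y) (j - 1) := by
  have hne : (PySem.List.pyRange 0 (y.length : Int) 1).map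
      (fun i => PySem.List.pyGetD y i 0 - PySem.List.pyGetD y (i - 1) 0) ≠ [] := by
    have hn : (0:Int) < y.length := by
      have := List.length_pos_iff.mpr hy; exact_mod_cast this
    rw [PySem.List.pyRange_one_cons hn]; simp
  rw [f, dif_neg hne, tail_map_eq_ddL y hy]
  by_cases h1 : j = 1 <;> simp [h1]

theorem map_getD_range (z : List Int) :
    (List.range z.length).map (fun k => z.getD k 0) = z := by
  apply List.ext_getElem (by simp)
  intro n h1 h2
  simp [List.getD_eq_getElem?_getD, List.getElem?_eq_getElem h2]

theorem cf_zero (z : List Int) : cf 0 z = z := by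
  unfold cf S
  have h : ∀ k, (∑ i ∈ Finset.range (0 + 1), (-1:Int) ^ (0 - i) * ((0:ℕ).choose i) * z.getD (k + i) 0)
      = z.getD k 0 := by intro k; simp
  simp only [Nat.sub_zero]
  rw [List.map_congr_left (fun k _ => h k)]
  exact map_getD_range z

theorem f_eq_cf (m : ℕ) : ∀ (y : List Int), 1 ≤ m → m ≤ y.length → f y (m : Int) = cf m y := by
  induction m with
  | zero => intro y h1 _; omega
  | succ n ih =>
    intro y h1 hm
    have hy : y ≠ [] := by
      intro h; subst h; simp at hm
    rw [f_unfold y hy]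
    by_cases hn : n = 0
    · subst hn
      rw [if_pos (by norm_num)]
      rw [← cf_ddL y 0, cf_zero]
    · rw [if_neg (by exact_mod_cast (by omega : (n : ℤ) + 1 ≠ 1))]
      rw [show ((n + 1 : ℕ) : Int) - 1 = (n : Int) by push_cast; ring]
      rw [ih (ddL y) (by omega) (by rw [length_ddL]; omega), cf_ddL]

-- ===== VERDICT (by name: the statement is the Claim_ definition above) =====
theorem f_spec : Claim_equal_f := by
  intro y j _ hpre
  unfold Spec_f
  obtain ⟨h1, h2⟩ := hpre
  have hj : j = ((j.toNat : ℕ) : Int) := by omega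
  rw [hj, f_eq_cf j.toNat y (by omega) (by omega), f_alt_eq_cf y j.toNat (by omega) (by omega)]
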